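-- pv_equiv track=rewrite | github.com/rocketboosters/dftxt | dftxt/_io/_read.py | _combine_cells_across_lines
-- ===== SOURCE A (Python) =====
-- import typing
--
-- def _combine_cells_across_lines(
--     existing: typing.List[typing.Optional[str]],
--     continuations: typing.List[typing.Optional[str]],
-- ) -> typing.List[typing.Optional[str]]:
--     combined: typing.List[typing.Optional[str]] = []
--     for prefix, suffix in zip(existing, continuations):
--         if prefix is None and suffix is None:
--             combined.append(None)
--         elif prefix is None:
--             combined.append(suffix)
--         elif suffix is None:
--             combined.append(prefix)
--         else:
--             combined.append(f"{prefix}{suffix}")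
--     return combined
-- ===== SOURCE B (Python) =====
-- import typing
--
-- def _combine_cells_across_lines(
--     existing: typing.List[typing.Optional[str]],
--     continuations: typing.List[typing.Optional[str]],
-- ) -> typing.List[typing.Optional[str]]:
--     # Staged passes over indices instead of one zip loop with a four-branch
--     # cascade: pad None to '' and concatenate (correct because '' is the
--     # identity of concatenation), then in a second pass restore None exactly
--     # where both cells were None.
--     n = min(len(existing), len(continuations))
--     texts = [
--         (existing[i] if existing[i] is not None else "")
--         + (continuations[i] if continuations[i] is not None else "")
--         for i in range(n)
--     ]
--     both_none = [
--         existing[i] is None and continuations[i] is None for i in range(n)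
--     ]
--     return [None if b else t for t, b in zip(texts, both_none)]
-- ===== Notes on version B (the rewrite author's own statement) =====
-- stated objective: alternative
-- what changed: Replaces the single zip loop with a four-branch None cascade by staged index-based passes: one pass concatenates with None padded to '' (the concatenation identity), a second records where both cells are None, and a final pass restores None there.
import Mathlib
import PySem

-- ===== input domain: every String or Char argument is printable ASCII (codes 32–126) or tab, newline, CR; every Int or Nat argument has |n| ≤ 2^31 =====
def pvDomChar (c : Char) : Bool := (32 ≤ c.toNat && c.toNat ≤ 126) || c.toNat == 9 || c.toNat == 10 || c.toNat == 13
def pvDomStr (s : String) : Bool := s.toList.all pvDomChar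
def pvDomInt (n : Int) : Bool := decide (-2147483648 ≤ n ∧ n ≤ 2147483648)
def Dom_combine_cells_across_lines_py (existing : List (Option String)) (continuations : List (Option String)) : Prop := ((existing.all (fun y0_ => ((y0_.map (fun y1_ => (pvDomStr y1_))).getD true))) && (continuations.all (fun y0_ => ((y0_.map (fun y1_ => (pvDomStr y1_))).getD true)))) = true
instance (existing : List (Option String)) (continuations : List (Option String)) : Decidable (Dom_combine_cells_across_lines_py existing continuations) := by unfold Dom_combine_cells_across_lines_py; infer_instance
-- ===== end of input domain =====

-- B replaces A's single zip loop with its four-branch None cascade by staged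
-- index-based passes (pad-None-to-'' concatenation, both-None mask, final merge);
-- same O(n) cost, different decomposition.


-- ===== PORT A =====
def combine_cells_across_lines_py (existing : List (Option String)) (continuations : List (Option String)) : List (Option String) :=
  (List.zip existing continuations).foldl
    (fun combined pc =>
      if pc.1 = none ∧ pc.2 = none then combined ++ [none]
      else if pc.1 = none then combined ++ [pc.2]
      else if pc.2 = none then combined ++ [pc.1]
      else combined ++ [some ((pc.1.getD "") ++ (pc.2.getD ""))])
    []

-- ===== PORT B =====
-- B: staged index passes; list indexing existing[i] with 0 ≤ i < n is exact as getD i none.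
def combine_cells_across_lines_py_alt (existing : List (Option String)) (continuations : List (Option String)) : List (Option String) :=
  let n := min existing.length continuations.length
  let texts : List String := (List.range n).map (fun i =>
    ((existing.getD i none).getD "") ++ ((continuations.getD i none).getD ""))
  let both_none : List Bool := (List.range n).map (fun i =>
    decide (existing.getD i none = none ∧ continuations.getD i none = none))
  (texts.zip both_none).map (fun tb => if tb.2 then none else some tb.1)

-- ===== PRECONDITION & SPEC =====
def Spec_combine_cells_across_lines_py (existing : List (Option String)) (continuations : List (Option String)) (out : List (Option String)) : Prop := out = combine_cells_across_lines_py_alt existing continuations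
instance (existing : List (Option String)) (continuations : List (Option String)) (out : List (Option String)) : Decidable (Spec_combine_cells_across_lines_py existing continuations out) := by unfold Spec_combine_cells_across_lines_py; infer_instance

-- ===== CLAIM (what is proved, stated in full; the proofs are below) =====
def Claim_equal_combine_cells_across_lines_py : Prop := ∀ (existing : List (Option String)) (continuations : List (Option String)), Dom_combine_cells_across_lines_py existing continuations → Spec_combine_cells_across_lines_py existing continuations (combine_cells_across_lines_py existing continuations)

-- ===== LEMMAS AND PROOFS =====

-- Canonical per-pair combining function both ports reduce to.
def pvComb (pc : Option String × Option String) : Option String :=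
  if pc.1 = none ∧ pc.2 = none then none
  else some ((pc.1.getD "") ++ (pc.2.getD ""))

theorem pv_fold_eq :
    ∀ (l : List (Option String × Option String)) (acc : List (Option String)),
      l.foldl
        (fun combined pc =>
          if pc.1 = none ∧ pc.2 = none then combined ++ [none]
          else if pc.1 = none then combined ++ [pc.2]
          else if pc.2 = none then combined ++ [pc.1]
          else combined ++ [some ((pc.1.getD "") ++ (pc.2.getD ""))])
        acc
      = acc ++ l.map pvComb := by
  intro l
  induction l with
  | nil => simp
  | cons pc xs ih =>
    intro acc
    rcases pc with ⟨p, s⟩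
    cases p <;> cases s <;> simp [List.foldl, ih, pvComb]

theorem pv_alt_eq (existing continuations : List (Option String)) :
    combine_cells_across_lines_py_alt existing continuations
      = (List.zip existing continuations).map pvComb := by
  unfold combine_cells_across_lines_py_alt
  apply List.ext_getElem
  · simp
  · intro i h1 h2
    simp only [List.getElem_map, List.getElem_zip, List.getElem_range] at *
    have hi : i < min existing.length continuations.length := by simpa using h2
    have he : i < existing.length := lt_of_lt_of_le hi (min_le_left _ _)
    have hc : i < continuations.length := lt_of_lt_of_le hi (min_le_right _ _)
    simp [List.getD, he, hc, pvComb]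

-- ===== VERDICT (by name: the statement is the Claim_ definition above) =====
theorem combine_cells_across_lines_py_spec : Claim_equal_combine_cells_across_lines_py := by
  intro existing continuations _
  unfold Spec_combine_cells_across_lines_py
  unfold combine_cells_across_lines_py
  rw [pv_fold_eq, pv_alt_eq]
  simp
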